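-- pv_equiv track=rewrite | github.com/sajadabvi/gunfolds | gunfolds/scripts/gendata.py | count_edges
-- ===== SOURCE A (Python) =====
-- def count_edges(g_estimated):
--     directed_count = 0
--     bidirected_count = 0
--
--     for src, destinations in g_estimated.items():
--         for dest, edge_type in destinations.items():
--             if edge_type == 1:
--                 directed_count += 1
--             elif edge_type == 2:
--                 bidirected_count += 1
--             elif edge_type == 3:
--                 directed_count += 1
--                 bidirected_count += 1
--
--     return directed_count, bidirected_count
-- ===== SOURCE B (Python) =====
-- def count_edges(g_estimated):
--     types = [et for dests in g_estimated.values() for et in dests.values()]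
--     return types.count(1) + types.count(3), types.count(2) + types.count(3)
-- ===== Notes on version B (the rewrite author's own statement) =====
-- stated objective: idiomatic
-- what changed: Replaces the branch-updated pair of running counters with a flattened list of edge types and closed-form arithmetic over list.count tallies.
import Mathlib
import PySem

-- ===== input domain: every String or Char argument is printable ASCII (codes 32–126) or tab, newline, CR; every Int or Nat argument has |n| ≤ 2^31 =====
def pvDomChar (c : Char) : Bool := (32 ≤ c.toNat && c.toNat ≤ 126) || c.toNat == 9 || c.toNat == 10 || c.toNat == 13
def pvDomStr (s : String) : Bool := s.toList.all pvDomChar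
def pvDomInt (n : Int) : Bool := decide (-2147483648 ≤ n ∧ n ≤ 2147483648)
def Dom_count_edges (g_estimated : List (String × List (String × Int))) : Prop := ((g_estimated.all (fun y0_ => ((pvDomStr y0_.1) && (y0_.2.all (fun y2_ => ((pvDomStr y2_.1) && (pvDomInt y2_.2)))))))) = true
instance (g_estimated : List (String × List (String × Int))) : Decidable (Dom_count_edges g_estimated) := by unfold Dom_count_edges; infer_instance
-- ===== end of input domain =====

-- B replaces A's branch-updated pair of running counters by a flattened edge-type
-- list and closed-form arithmetic over .count tallies (idiomatic; return value only).

-- ===== PORT A =====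
def count_edges (g_estimated : List (String × List (String × Int))) : Int × Int :=
  g_estimated.foldl (fun acc p =>
    p.2.foldl (fun acc2 q =>
      if q.2 = 1 then (acc2.1 + 1, acc2.2)
      else if q.2 = 2 then (acc2.1, acc2.2 + 1)
      else if q.2 = 3 then (acc2.1 + 1, acc2.2 + 1)
      else acc2) acc) (0, 0)

-- ===== PORT B =====
def count_edges_alt (g_estimated : List (String × List (String × Int))) : Int × Int :=
  let types := g_estimated.flatMap (fun p => p.2.map (fun q => q.2))
  ((PySem.List.count types 1 : Int) + (PySem.List.count types 3 : Int),
   (PySem.List.count types 2 : Int) + (PySem.List.count types 3 : Int))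

-- ===== PRECONDITION & SPEC =====
def Spec_count_edges (g_estimated : List (String × List (String × Int))) (out : Int × Int) : Prop := out = count_edges_alt g_estimated
instance (g_estimated : List (String × List (String × Int))) (out : Int × Int) : Decidable (Spec_count_edges g_estimated out) := by unfold Spec_count_edges; infer_instance

-- ===== CLAIM (what is proved, stated in full; the proofs are below) =====
def Claim_equal_count_edges : Prop := ∀ (g_estimated : List (String × List (String × Int))), Dom_count_edges g_estimated → Spec_count_edges g_estimated (count_edges g_estimated)

-- ===== LEMMAS AND PROOFS =====

lemma count_edges_inner (l : List (String × Int)) (a b : Int) :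
    l.foldl (fun acc2 q =>
      if q.2 = 1 then (acc2.1 + 1, acc2.2)
      else if q.2 = 2 then (acc2.1, acc2.2 + 1)
      else if q.2 = 3 then (acc2.1 + 1, acc2.2 + 1)
      else acc2) (a, b)
    = (a + ((l.map (fun q => q.2)).count 1 : Int) + ((l.map (fun q => q.2)).count 3 : Int),
       b + ((l.map (fun q => q.2)).count 2 : Int) + ((l.map (fun q => q.2)).count 3 : Int)) := by
  induction l generalizing a b with
  | nil => simp
  | cons x t ih =>
    simp only [List.foldl_cons, List.map_cons, List.count_cons, beq_iff_eq]
    split_ifs <;> rw [ih] <;> simp only [Prod.mk.injEq] <;> constructor <;> omega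

lemma count_edges_outer (g : List (String × List (String × Int))) (a b : Int) :
    g.foldl (fun acc p =>
      p.2.foldl (fun acc2 q =>
        if q.2 = 1 then (acc2.1 + 1, acc2.2)
        else if q.2 = 2 then (acc2.1, acc2.2 + 1)
        else if q.2 = 3 then (acc2.1 + 1, acc2.2 + 1)
        else acc2) acc) (a, b)
    = (a + (((g.flatMap (fun p => p.2.map (fun q => q.2))).count 1 : Int)
         + ((g.flatMap (fun p => p.2.map (fun q => q.2))).count 3 : Int)),
       b + (((g.flatMap (fun p => p.2.map (fun q => q.2))).count 2 : Int)
         + ((g.flatMap (fun p => p.2.map (fun q => q.2))).count 3 : Int))) := by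
  induction g generalizing a b with
  | nil => simp
  | cons x t ih =>
    simp only [List.foldl_cons, List.flatMap_cons, List.count_append]
    rw [count_edges_inner, ih]
    simp only [Prod.mk.injEq]
    constructor <;> omega

-- ===== VERDICT (by name: the statement is the Claim_ definition above) =====
theorem count_edges_spec : Claim_equal_count_edges := by
  intro g _
  unfold Spec_count_edges count_edges count_edges_alt
  rw [count_edges_outer]
  simp [PySem.List.count_eq]
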